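-- pv_equiv track=rewrite | github.com/FranTapia01/Algo1py | EjerciciosGuia/taller2.py | alcanza_el_texto
-- ===== SOURCE A (Python) =====
-- def alcanza_el_texto(revista, texto):
-- 	apariciones = {}
-- 	for letra in revista.lower():
-- 		apariciones[letra] = apariciones.get(letra, 0) + 1
-- 	for letra in texto.lower():
-- 		if letra == ' ': continue
-- 		#if letra not in apariciones or apariciones[letra] < 1:
-- 		#	return False
-- 		apariciones[letra] = apariciones.get(letra, 0) - 1
-- 		if apariciones[letra] < 0:
-- 			return False
--
-- 	return True
-- ===== SOURCE B (Python) =====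
-- def alcanza_el_texto(revista, texto):
--     need = sorted(c for c in texto.lower() if c != ' ')
--     have = sorted(revista.lower())
--     i = 0
--     for c in need:
--         while i < len(have) and have[i] < c:
--             i += 1
--         if i == len(have) or have[i] != c:
--             return False
--         i += 1
--     return True
-- ===== Notes on version B (the rewrite author's own statement) =====
-- stated objective: alternative
-- what changed: Replaces A's dict-of-counts with incremental decrements and early False by a sort-then-merge algorithm: sort the needed letters (texto lowered, spaces dropped) and the available letters (revista lowered) and run a two-pointer merge scan that checks the needed sorted list is a sub-multiset of the available sorted list.
import Mathlib
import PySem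

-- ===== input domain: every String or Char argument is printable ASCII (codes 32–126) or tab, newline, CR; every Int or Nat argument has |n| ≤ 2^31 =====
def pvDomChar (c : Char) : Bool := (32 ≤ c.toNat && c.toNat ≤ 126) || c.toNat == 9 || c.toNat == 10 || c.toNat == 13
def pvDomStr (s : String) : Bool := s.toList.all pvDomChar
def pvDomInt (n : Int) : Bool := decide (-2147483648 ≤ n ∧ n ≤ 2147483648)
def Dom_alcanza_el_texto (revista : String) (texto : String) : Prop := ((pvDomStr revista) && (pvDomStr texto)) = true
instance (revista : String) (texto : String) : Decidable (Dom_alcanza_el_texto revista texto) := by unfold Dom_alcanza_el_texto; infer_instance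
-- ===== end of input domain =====

-- B replaces A's dict-of-counts with incremental decrements by a sort-then-merge
-- two-pointer sub-multiset check on the two sorted letter lists; objective: alternative.

-- ===== PORT A =====
-- the second for-loop of A, with the dict as loop state and early return False
def alcanza_loop : PySem.Dict Char Int → List Char → Bool
  | _, [] => true
  | d, letra :: rest =>
    if letra = ' ' then alcanza_loop d rest
    else
      let v := d.getD letra 0 - 1
      let d' := d.insert letra v
      if v < 0 then false else alcanza_loop d' rest

def alcanza_el_texto (revista : String) (texto : String) : Bool :=
  let apariciones := (PySem.Str.lower revista).toList.foldl
    (fun d letra => d.insert letra (d.getD letra 0 + 1)) PySem.Dict.empty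
  alcanza_loop apariciones (PySem.Str.lower texto).toList

-- ===== PORT B =====
-- the for-loop over `need` with the two-pointer while over `have`:
-- tail of `have` from pointer i onward is the second argument
def mergeCheck : List Char → List Char → Bool
  | [], _ => true
  | _ :: _, [] => false
  | c :: cs, h :: hs =>
    if h < c then mergeCheck (c :: cs) hs          -- while have[i] < c: i += 1
    else if h = c then mergeCheck cs hs            -- match, i += 1, next c
    else false                                     -- have[i] != c: return False

def alcanza_el_texto_alt (revista : String) (texto : String) : Bool :=
  let need := PySem.List.sorted ((PySem.Str.lower texto).toList.filter (fun c => c ≠ ' ')) (fun c => c) false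
  let haveL := PySem.List.sorted (PySem.Str.lower revista).toList (fun c => c) false
  mergeCheck need haveL

-- ===== PRECONDITION & SPEC =====
def Spec_alcanza_el_texto (revista : String) (texto : String) (out : Bool) : Prop := out = alcanza_el_texto_alt revista texto
instance (revista : String) (texto : String) (out : Bool) : Decidable (Spec_alcanza_el_texto revista texto out) := by unfold Spec_alcanza_el_texto; infer_instance

-- ===== CLAIM (what is proved, stated in full; the proofs are below) =====
def Claim_equal_alcanza_el_texto : Prop := ∀ (revista : String) (texto : String), Dom_alcanza_el_texto revista texto → Spec_alcanza_el_texto revista texto (alcanza_el_texto revista texto)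

-- ===== LEMMAS AND PROOFS =====

-- A's loop succeeds iff no non-space letter of the remaining text is counted more often
-- than the dict currently credits it.
theorem alcanza_loop_eq_true_iff (rest : List Char) (d : PySem.Dict Char Int) :
    alcanza_loop d rest = true ↔
      ∀ c ∈ rest.filter (fun c => c ≠ ' '),
        ((rest.filter (fun c => c ≠ ' ')).count c : Int) ≤ d.getD c 0 := by
  induction rest generalizing d with
  | nil => simp [alcanza_loop]
  | cons letra rest ih =>
    by_cases hsp : letra = ' '
    · subst hsp
      simpa [alcanza_loop] using ih d
    · have hfil : (letra :: rest).filter (fun c => decide (c ≠ ' '))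
          = letra :: rest.filter (fun c => decide (c ≠ ' ')) :=
        List.filter_cons_of_pos (by simp [hsp])
      rw [hfil]
      simp only [alcanza_loop, if_neg hsp]
      by_cases hv : d.getD letra 0 - 1 < 0
      · rw [if_pos hv]
        constructor
        · intro h; exact absurd h (by simp)
        · intro h
          have h1 := h letra (List.mem_cons_self ..)
          rw [List.count_cons_self] at h1
          have h2 : (0:Int) ≤ ((rest.filter (fun c => decide (c ≠ ' '))).count letra : Int) := by positivity
          omega
      · rw [if_neg hv, ih]
        constructor
        · intro h c hc
          by_cases hceq : c = letra
          · subst hceq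
            rw [List.count_cons_self]
            by_cases hmem : c ∈ rest.filter (fun c => decide (c ≠ ' '))
            · have h1 := h c hmem
              rw [PySem.Dict.getD_insert, if_pos rfl] at h1
              omega
            · rw [List.count_eq_zero_of_not_mem hmem]
              omega
          · have hc' : c ∈ rest.filter (fun c => decide (c ≠ ' ')) := by
              rcases List.mem_cons.mp hc with h' | h'
              · exact absurd h' hceq
              · exact h'
            have h1 := h c hc'
            rw [PySem.Dict.getD_insert, if_neg hceq] at h1
            rw [List.count_cons_of_ne (fun h' => hceq h'.symm)]
            exact h1
        · intro h c hc
          rw [PySem.Dict.getD_insert]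
          by_cases hceq : c = letra
          · subst hceq
            rw [if_pos rfl]
            have h1 := h c (List.mem_cons_self ..)
            rw [List.count_cons_self] at h1
            omega
          · rw [if_neg hceq]
            have h1 := h c (List.mem_cons_of_mem _ hc)
            rw [List.count_cons_of_ne (fun h' => hceq h'.symm)] at h1
            exact h1

-- the merge scan on two sorted lists decides the sub-multiset (count) condition
theorem mergeCheck_iff (need hv : List Char)
    (hn : need.Pairwise (· ≤ ·)) (hh : hv.Pairwise (· ≤ ·)) :
    mergeCheck need hv = true ↔ ∀ c ∈ need, need.count c ≤ hv.count c := by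
  induction need, hv using mergeCheck.induct with
  | case1 hv => simp [mergeCheck]
  | case2 c cs =>
    simp only [mergeCheck, Bool.false_eq_true, false_iff]
    intro h
    have h1 := h c (List.mem_cons_self ..)
    simp [List.count_cons_self] at h1
  | case3 c cs h hs hlt ih =>
    rw [List.pairwise_cons] at hh
    have ihx := ih hn hh.2
    simp only [mergeCheck, if_pos hlt]
    rw [ihx]
    have hnotmem : ∀ x ∈ c :: cs, x ≠ h := by
      intro x hx hxh
      rcases List.mem_cons.mp hx with h' | h'
      · exact absurd (h' ▸ hxh ▸ hlt) (lt_irrefl _)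
      · have := List.rel_of_pairwise_cons hn h'
        exact absurd (lt_of_lt_of_le hlt (hxh ▸ this)) (lt_irrefl _)
    constructor
    · intro hcond x hx
      rw [List.count_cons_of_ne (fun e => hnotmem x hx e.symm)]
      exact hcond x hx
    · intro hcond x hx
      have := hcond x hx
      rwa [List.count_cons_of_ne (fun e => hnotmem x hx e.symm)] at this
  | case4 cs c hs hlt ih =>
    simp only [mergeCheck, if_neg hlt, if_true]
    rw [ih (List.Pairwise.of_cons hn) (List.Pairwise.of_cons hh)]
    constructor
    · intro hcond x hx
      by_cases hxc : x = c
      · subst hxc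
        rw [List.count_cons_self, List.count_cons_self]
        by_cases hmem : x ∈ cs
        · have h1 := hcond x hmem; omega
        · rw [List.count_eq_zero_of_not_mem hmem]; omega
      · rcases List.mem_cons.mp hx with h' | h'
        · exact absurd h' hxc
        · rw [List.count_cons_of_ne (Ne.symm hxc), List.count_cons_of_ne (Ne.symm hxc)]
          exact hcond x h'
    · intro hcond x hx
      have h1 := hcond x (List.mem_cons_of_mem _ hx)
      by_cases hxc : x = c
      · subst hxc
        rw [List.count_cons_self, List.count_cons_self] at h1
        omega
      · rwa [List.count_cons_of_ne (Ne.symm hxc), List.count_cons_of_ne (Ne.symm hxc)] at h1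
  | case5 c cs h hs hlt hne =>
    simp only [mergeCheck, if_neg hlt, if_neg hne, Bool.false_eq_true, false_iff]
    intro hcond
    have hch : c < h := lt_of_le_of_ne (le_of_not_gt hlt) (fun e => hne e.symm)
    have hcmem : c ∉ h :: hs := by
      intro hm
      rcases List.mem_cons.mp hm with h' | h'
      · exact hne h'.symm
      · exact absurd (lt_of_lt_of_le hch (List.rel_of_pairwise_cons hh h')) (lt_irrefl c)
    have h1 := hcond c (List.mem_cons_self ..)
    rw [List.count_cons_self, List.count_eq_zero_of_not_mem hcmem] at h1
    omega

-- ===== VERDICT (by name: the statement is the Claim_ definition above) =====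
theorem alcanza_el_texto_spec : Claim_equal_alcanza_el_texto := by
  intro revista texto _
  unfold Spec_alcanza_el_texto alcanza_el_texto alcanza_el_texto_alt
  rw [PySem.Dict.foldl_insert_getD_add_one_eq_counter]
  set F := (PySem.Str.lower texto).toList.filter (fun c => c ≠ ' ') with hF
  set R := (PySem.Str.lower revista).toList with hR
  have hpermN : (PySem.List.sorted F (fun c => c) false).Perm F := PySem.List.sorted_perm ..
  have hpermR : (PySem.List.sorted R (fun c => c) false).Perm R := PySem.List.sorted_perm ..
  rw [Bool.eq_iff_iff, alcanza_loop_eq_true_iff,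
      mergeCheck_iff _ _ (PySem.List.sorted_pairwise ..) (PySem.List.sorted_pairwise ..)]
  constructor
  · intro hcond x hx
    have hx' : x ∈ F := hpermN.mem_iff.mp hx
    have h1 := hcond x hx'
    rw [PySem.Dict.getD_counter] at h1
    rw [hpermN.count_eq, hpermR.count_eq]
    exact_mod_cast h1
  · intro hcond x hx
    have h1 := hcond x (hpermN.mem_iff.mpr hx)
    rw [hpermN.count_eq, hpermR.count_eq] at h1
    rw [PySem.Dict.getD_counter]
    exact_mod_cast h1
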